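-- pv_equiv track=rewrite | github.com/VicenteEspinosa/Ramos | ProgramacionAvanzada/vnespinosa-iic2233-2019-2/Actividades/AC02/consultas.py | stock_comida
-- ===== SOURCE A (Python) =====
-- def stock_comida(alumnos):
--     comida_contada = dict()
--     comidas = alumnos[1]
--     for alumno in alumnos[0]:
--         if comidas[alumno] in comida_contada:
--             comida_contada[comidas[alumno]] = comida_contada[comidas[alumno]] + 1
--         else:
--             comida_contada[comidas[alumno]] = 1
--     elemento = []
--     for comida in comida_contada:
--         elemento.append((comida, comida_contada[comida]))
--     return(elemento)
-- ===== SOURCE B (Python) =====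
-- def stock_comida(alumnos):
--     comidas = alumnos[1]
--     fs = [comidas[alumno] for alumno in alumnos[0]]
--     elemento = []
--     while fs:
--         f = fs[0]
--         resto = [x for x in fs[1:] if x != f]
--         elemento.append((f, len(fs) - len(resto)))
--         fs = resto
--     return elemento
-- ===== Notes on version B (the rewrite author's own statement) =====
-- stated objective: alternative
-- what changed: B replaces A's single-pass dict accumulation with a partition-style group-by: repeatedly take the first remaining food, filter out all its copies, and read its count off the length drop, so no counting structure is ever maintained.
import Mathlib
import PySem

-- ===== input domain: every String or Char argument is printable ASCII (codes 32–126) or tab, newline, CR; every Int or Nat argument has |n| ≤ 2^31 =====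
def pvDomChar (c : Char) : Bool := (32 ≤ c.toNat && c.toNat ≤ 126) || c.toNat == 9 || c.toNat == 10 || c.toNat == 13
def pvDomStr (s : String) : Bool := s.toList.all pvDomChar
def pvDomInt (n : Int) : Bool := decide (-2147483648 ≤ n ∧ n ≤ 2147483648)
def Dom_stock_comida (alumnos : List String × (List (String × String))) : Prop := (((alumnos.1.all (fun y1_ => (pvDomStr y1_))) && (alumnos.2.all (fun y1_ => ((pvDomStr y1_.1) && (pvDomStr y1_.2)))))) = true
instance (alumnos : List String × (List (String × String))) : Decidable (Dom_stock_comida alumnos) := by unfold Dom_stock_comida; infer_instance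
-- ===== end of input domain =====

-- B groups the foods list by repeated partition (take first food, filter out its copies,
-- count = length drop) instead of A's single accumulating dict pass; alternative decomposition.

-- ===== PORT A =====
def stock_comida (alumnos : List String × (List (String × String))) : List (String × Int) :=
  let comidas := PySem.Dict.mk alumnos.2
  let comida_contada := alumnos.1.foldl (fun d alumno =>
      let f := (comidas.get? alumno).getD ""   -- lookup raises KeyError when missing; Pre_ excludes that
      if d.contains f then d.insert f (d.getD f 0 + 1) else d.insert f 1)
    PySem.Dict.empty
  comida_contada.keys.foldl (fun e comida => e ++ [(comida, comida_contada.getD comida 0)]) []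

-- ===== PORT B =====
-- the 'while fs:' loop of Source B: pop the first food, filter its copies out, append the pair
def agrupaLoop (fs : List String) (elemento : List (String × Int)) : List (String × Int) :=
  match fs with
  | [] => elemento
  | f :: rest =>
    let resto := rest.filter (fun x => x ≠ f)
    agrupaLoop resto (elemento ++ [(f, ((f :: rest).length : Int) - (resto.length : Int))])
termination_by fs.length
decreasing_by
  simp only [List.length_cons, List.length_unattach]
  exact Nat.lt_succ_of_le (le_trans (List.length_filter_le _ _) (by simp))

def stock_comida_alt (alumnos : List String × (List (String × String))) : List (String × Int) :=
  let comidas := PySem.Dict.mk alumnos.2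
  let fs := alumnos.1.map (fun alumno => (comidas.get? alumno).getD "")
  agrupaLoop fs []

-- ===== PRECONDITION & SPEC =====
-- Pre_ excludes exactly the inputs where A raises KeyError: a student of alumnos[0] absent from alumnos[1].
def Pre_stock_comida (alumnos : List String × (List (String × String))) : Prop :=
  ∀ a ∈ alumnos.1, ((PySem.Dict.mk alumnos.2).get? a).isSome
instance (alumnos : List String × (List (String × String))) : Decidable (Pre_stock_comida alumnos) := by unfold Pre_stock_comida; infer_instance

def pvWitness_stock_comida : (List String × (List (String × String))) :=
  (["ana", "bob", "ana"], [("ana", "pizza"), ("bob", "tacos")])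

def Spec_stock_comida (alumnos : List String × (List (String × String))) (out : List (String × Int)) : Prop := out = stock_comida_alt alumnos
instance (alumnos : List String × (List (String × String))) (out : List (String × Int)) : Decidable (Spec_stock_comida alumnos out) := by unfold Spec_stock_comida; infer_instance

-- ===== CLAIM (what is proved, stated in full; the proofs are below) =====
def Claim_equal_stock_comida : Prop := ∀ (alumnos : List String × (List (String × String))), Dom_stock_comida alumnos → Pre_stock_comida alumnos → Spec_stock_comida alumnos (stock_comida alumnos)

-- ===== LEMMAS AND PROOFS =====

-- A's branch 'if seen: +1 else: 1' is an unconditional insert of getD+1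
lemma step_insert (d : PySem.Dict String Int) (f : String) :
    (if d.contains f then d.insert f (d.getD f 0 + 1) else d.insert f 1) =
    d.insert f (d.getD f 0 + 1) := by
  by_cases h : d.contains f = true
  · simp [h]
  · have hn : d.get? f = none := by
      rw [PySem.Dict.get?_eq_none_iff_contains]; simpa using h
    have h0 : d.getD f 0 = 0 := by rw [PySem.Dict.getD_eq_get?_getD, hn]; rfl
    simp [h, h0]

-- counting loop with a key function is Counter of the mapped list
lemma fold_counter (l : List String) (k : String → String) :
    l.foldl (fun d a => d.insert (k a) (d.getD (k a) 0 + 1)) PySem.Dict.empty =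
    PySem.Dict.counter (l.map k) := by
  rw [← PySem.Dict.foldl_insert_getD_add_one_eq_counter, List.foldl_map]

-- adding onto a set the first element first: needs elements ≠ a
lemma foldl_add_cons (t : List String) : ∀ (s : List String) (a : String),
    (∀ x ∈ t, x ≠ a) →
    t.foldl PySem.Set.add (a :: s) = a :: t.foldl PySem.Set.add s := by
  induction t with
  | nil => intro s a _; rfl
  | cons x t ih =>
    intro s a h
    have hxa : x ≠ a := h x (by simp)
    have hadd : PySem.Set.add (a :: s) x = a :: PySem.Set.add s x := by
      simp [PySem.Set.add, PySem.Set.contains, hxa]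
      split <;> rfl
    simp only [List.foldl_cons, hadd]
    exact ih _ _ (fun y hy => h y (by simp [hy]))

-- elements already present may be dropped from the fold input
lemma foldl_add_filter (t : List String) : ∀ (s : List String) (a : String), a ∈ s →
    t.foldl PySem.Set.add s = (t.filter (fun x => x ≠ a)).foldl PySem.Set.add s := by
  induction t with
  | nil => intro s a _; rfl
  | cons x t ih =>
    intro s a ha
    by_cases hxa : x = a
    · subst hxa
      have hadd : PySem.Set.add s x = s := by
        simp [PySem.Set.add, PySem.Set.contains, ha]
      simp only [List.foldl_cons, List.filter_cons, hadd]
      rw [if_neg (by simp)]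
      exact ih s x ha
    · simp only [List.foldl_cons, List.filter_cons]
      rw [if_pos (by simp [hxa])]
      simp only [List.foldl_cons]
      refine ih (PySem.Set.add s x) a ?_
      simp only [PySem.Set.add]
      split <;> simp [ha]

-- first-occurrence dedup satisfies the partition recursion
lemma ofList_cons_filter (a : String) (l : List String) :
    PySem.Set.ofList (a :: l) = a :: PySem.Set.ofList (l.filter (fun x => x ≠ a)) := by
  have h1 : PySem.Set.ofList (a :: l) = l.foldl PySem.Set.add [a] := by
    simp [PySem.Set.ofList_eq_foldl, PySem.Set.add, PySem.Set.contains]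
  rw [h1, foldl_add_filter l [a] a (by simp),
    foldl_add_cons _ [] a (fun x hx => by simpa using (List.of_mem_filter hx)),
    PySem.Set.ofList_eq_foldl]

-- removing every copy of f drops the length by exactly count f
lemma length_filter_ne (t : List String) (f : String) :
    (t.filter (fun x => decide (x ≠ f))).length + t.count f = t.length := by
  induction t with
  | nil => rfl
  | cons x t ih =>
    simp only [ne_eq, decide_not] at ih ⊢
    by_cases h : x = f
    · subst h; simp; omega
    · simp [h]; omega

-- main invariant: the loop computes the first-occurrence counts
lemma agrupaLoop_eq (n : ℕ) : ∀ (l : List String), l.length ≤ n → ∀ (e : List (String × Int)),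
    agrupaLoop l e = e ++ (PySem.Set.ofList l).map (fun g => (g, (l.count g : Int))) := by
  induction n with
  | zero =>
    intro l hl e
    have h0 : l = [] := List.eq_nil_of_length_eq_zero (Nat.le_zero.mp hl)
    subst h0
    simp [agrupaLoop, PySem.Set.ofList_eq_foldl]
  | succ n ih =>
    intro l hl e
    match l with
    | [] => simp [agrupaLoop, PySem.Set.ofList_eq_foldl]
    | f :: rest =>
      rw [agrupaLoop]
      have hlen : (rest.filter (fun x => decide (x ≠ f))).length ≤ n :=
        le_trans (List.length_filter_le _ _) (Nat.lt_succ_iff.mp (by simpa using hl))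
      rw [ih _ hlen, ofList_cons_filter]
      simp only [List.map_cons, List.append_assoc, List.singleton_append]
      congr 1
      congr 1
      · -- head pair: the length drop is the count of f
        have hc := length_filter_ne rest f
        have hcc : (f :: rest).count f = rest.count f + 1 := by
          simp
        congr 1
        simp only [List.length_cons, hcc]
        push_cast
        omega
      · -- tail: counts of the other foods are unchanged by the filter
        apply List.map_congr_left
        intro g hg
        have hgrest : g ∈ rest.filter (fun x => decide (x ≠ f)) :=
          (PySem.Set.mem_ofList _ _).mp hg
        have hgf : g ≠ f := by simpa using List.of_mem_filter hgrest
        congr 1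
        rw [List.count_cons_of_ne hgf.symm, List.count_filter (by simp [hgf])]

-- ===== VERDICT (by name: the statement is the Claim_ definition above) =====
theorem stock_comida_spec : Claim_equal_stock_comida := by
  intro alumnos _ _
  unfold Spec_stock_comida stock_comida stock_comida_alt
  rw [agrupaLoop_eq (alumnos.1.map (fun alumno => ((PySem.Dict.mk alumnos.2).get? alumno).getD "")).length _ le_rfl]
  simp only [step_insert, fold_counter,
    PySem.List.foldl_append_singleton_eq_map, List.nil_append,
    PySem.Dict.keys_counter, PySem.Dict.getD_counter]
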